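-- pv_equiv track=rewrite | github.com/BinguniAthapaththu/normalization-algorithm | normalization_module3.py | construct_dependency_matrix
-- ===== SOURCE A (Python) =====
-- def construct_dependency_matrix(dependencies, simple_keys):
--     num_determinants = len(dependencies)
--     num_simple_keys = len(simple_keys)
--     dependency_matrix = [[0] * num_simple_keys for _ in range(num_determinants)]
--
--     for i, (determinants, dependents) in enumerate(dependencies):
--         determinant_set = set(determinants)
--         for j, simple_key in enumerate(simple_keys):
--             if simple_key in dependents:
--                 dependency_matrix[i][j] = 1
--             if simple_key in determinant_set:
--                 dependency_matrix[i][j] = 2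
--
--     return dependency_matrix
-- ===== SOURCE B (Python) =====
-- def construct_dependency_matrix(dependencies, simple_keys):
--     index = {}
--     for j, key in enumerate(simple_keys):
--         index.setdefault(key, []).append(j)
--     matrix = []
--     for determinants, dependents in dependencies:
--         row = [0] * len(simple_keys)
--         for x in dependents:
--             for j in index.get(x, []):
--                 row[j] = 1
--         for x in determinants:
--             for j in index.get(x, []):
--                 row[j] = 2
--         matrix.append(row)
--     return matrix
-- ===== Notes on version B (the rewrite author's own statement) =====
-- stated objective: faster
-- what changed: Instead of scanning every simple_key per row and testing membership in the dependents list for each, B builds a key-to-column-positions index dict once and, per row, writes 1s at the columns of each dependent and then 2s at the columns of each determinant, touching only matching columns.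
import Mathlib
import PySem

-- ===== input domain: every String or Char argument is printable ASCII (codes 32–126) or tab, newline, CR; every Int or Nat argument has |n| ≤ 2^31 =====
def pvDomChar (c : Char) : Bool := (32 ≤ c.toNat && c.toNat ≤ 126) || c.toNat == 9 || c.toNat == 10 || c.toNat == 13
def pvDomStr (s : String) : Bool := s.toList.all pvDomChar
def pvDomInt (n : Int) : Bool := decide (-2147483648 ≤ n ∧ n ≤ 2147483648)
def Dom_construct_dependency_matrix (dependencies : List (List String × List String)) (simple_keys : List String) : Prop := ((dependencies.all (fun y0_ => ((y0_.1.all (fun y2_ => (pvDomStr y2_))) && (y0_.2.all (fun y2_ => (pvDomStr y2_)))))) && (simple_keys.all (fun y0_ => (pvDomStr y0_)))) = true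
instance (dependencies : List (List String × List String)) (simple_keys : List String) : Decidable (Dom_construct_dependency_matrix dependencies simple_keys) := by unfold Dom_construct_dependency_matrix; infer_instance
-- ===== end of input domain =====

-- B replaces A's per-row scan over all simple_keys (with an 'in dependents' list scan per key)
-- by a key→columns index dict built once, writing 1s then 2s only at the matching columns (objective: faster).

-- row[j] = v for an index j coming from enumerate, hence 0 ≤ j < len(row); exact there (.toNat is the identity on these j)
def pySetIdx (r : List Int) (j : Int) (v : Int) : List Int := r.set j.toNat v

-- ===== PORT A =====
-- A allocates the zero matrix and mutates row i in iteration i of the outer loop; since each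
-- iteration touches only its own row, the outer loop is rendered as a map producing row i,
-- and the inner 'for j, simple_key in enumerate(simple_keys)' as a fold over enumerate mutating the row.
def construct_dependency_matrix (dependencies : List (List String × List String)) (simple_keys : List String) : List (List Int) :=
  dependencies.map (fun d =>
    let determinant_set := PySem.Set.ofList d.1
    (PySem.List.enumerate simple_keys 0).foldl
      (fun row p =>
        let row := if d.2.contains p.2 then pySetIdx row p.1 1 else row
        if PySem.Set.contains determinant_set p.2 then pySetIdx row p.1 2 else row)
      (List.replicate simple_keys.length 0))

-- ===== PORT B =====
def construct_dependency_matrix_alt (dependencies : List (List String × List String)) (simple_keys : List String) : List (List Int) :=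
  let index : PySem.Dict String (List Int) :=
    (PySem.List.enumerate simple_keys 0).foldl
      (fun d p => d.insert p.2 (d.getD p.2 [] ++ [p.1])) PySem.Dict.empty
  dependencies.map (fun dep =>
    let row0 : List Int := List.replicate simple_keys.length 0
    let row1 := dep.2.foldl (fun r x => (index.getD x []).foldl (fun r j => pySetIdx r j 1) r) row0
    dep.1.foldl (fun r x => (index.getD x []).foldl (fun r j => pySetIdx r j 2) r) row1)

-- ===== PRECONDITION & SPEC =====
def Spec_construct_dependency_matrix (dependencies : List (List String × List String)) (simple_keys : List String) (out : List (List Int)) : Prop := out = construct_dependency_matrix_alt dependencies simple_keys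
instance (dependencies : List (List String × List String)) (simple_keys : List String) (out : List (List Int)) : Decidable (Spec_construct_dependency_matrix dependencies simple_keys out) := by unfold Spec_construct_dependency_matrix; infer_instance

-- ===== CLAIM (what is proved, stated in full; the proofs are below) =====
def Claim_equal_construct_dependency_matrix : Prop := ∀ (dependencies : List (List String × List String)) (simple_keys : List String), Dom_construct_dependency_matrix dependencies simple_keys → Spec_construct_dependency_matrix dependencies simple_keys (construct_dependency_matrix dependencies simple_keys)

-- ===== LEMMAS AND PROOFS =====

-- the value A leaves at column j of row (dets, deps): 2 beats 1 beats 0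
def vOf (dets deps : List String) (k : String) : Int :=
  if dets.contains k then 2 else if deps.contains k then 1 else 0

-- the columns of key x, in order
def posKeys (x : String) (keys : List String) : List Int :=
  (PySem.List.enumerate keys 0).filterMap (fun p => if p.2 = x then some p.1 else none)

theorem set_append_len (pre t : List Int) (c v : Int) :
    (pre ++ c :: t).set pre.length v = pre ++ v :: t := by
  induction pre with
  | nil => rfl
  | cons a pre ih => simp [List.set, ih]

theorem pySetIdx_append_len (pre t : List Int) (c v : Int) :
    pySetIdx (pre ++ c :: t) (pre.length : Int) v = pre ++ v :: t := by
  simp [pySetIdx, set_append_len]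

theorem rowA_eq (dets deps keys : List String) : ∀ pre : List Int,
    (PySem.List.enumerate keys (pre.length : Int)).foldl
      (fun row p =>
        let row := if deps.contains p.2 then pySetIdx row p.1 1 else row
        if PySem.Set.contains (PySem.Set.ofList dets) p.2 then pySetIdx row p.1 2 else row)
      (pre ++ List.replicate keys.length 0)
    = pre ++ keys.map (vOf dets deps) := by
  induction keys with
  | nil => intro pre; simp [PySem.List.enumerate_nil]
  | cons k ks ih =>
    intro pre
    rw [PySem.List.enumerate_cons]
    simp only [List.foldl_cons, List.length_cons, List.replicate_succ, List.map_cons]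
    have hstep :
        (let row := if deps.contains k then pySetIdx (pre ++ (0:Int) :: List.replicate ks.length 0) (pre.length : Int) 1 else pre ++ (0:Int) :: List.replicate ks.length 0
         if PySem.Set.contains (PySem.Set.ofList dets) k then pySetIdx row (pre.length : Int) 2 else row)
        = pre ++ vOf dets deps k :: List.replicate ks.length 0 := by
      simp only [vOf]
      by_cases h1 : dets.contains k <;> by_cases h2 : deps.contains k <;>
        simp_all [pySetIdx_append_len, PySem.Set.contains_eq_listContains, PySem.Set.mem_ofList,
          List.contains_iff_mem]
    rw [hstep]
    have hlen : ((pre.length : Int) + 1) = (((pre ++ [vOf dets deps k]).length : Nat) : Int) := by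
      simp
    rw [hlen]
    have := ih (pre ++ [vOf dets deps k])
    simpa [List.append_assoc] using this

theorem index_getD (keys : List String) (x : String) :
    ((PySem.List.enumerate keys 0).foldl
      (fun d p => d.insert p.2 (d.getD p.2 [] ++ [p.1])) (PySem.Dict.empty : PySem.Dict String (List Int))).getD x []
    = posKeys x keys := by
  have gen : ∀ (ps : List (Int × String)) (d : PySem.Dict String (List Int)),
      (ps.foldl (fun d p => d.insert p.2 (d.getD p.2 [] ++ [p.1])) d).getD x []
      = d.getD x [] ++ ps.filterMap (fun p => if p.2 = x then some p.1 else none) := by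
    intro ps
    induction ps with
    | nil => intro d; simp
    | cons p ps ih =>
      intro d
      simp only [List.foldl_cons, List.filterMap_cons, ih]
      by_cases h : p.2 = x
      · subst h
        rw [PySem.Dict.getD_insert_self]
        simp
      · rw [PySem.Dict.getD_insert_of_ne]
        · simp [h]
        · exact fun hc => h hc.symm
  rw [posKeys, gen]
  simp [PySem.Dict.getD, PySem.Dict.get?, PySem.Dict.empty]

theorem mem_posKeys (x : String) (keys : List String) (i : Nat) :
    ((i : Int) ∈ posKeys x keys) ↔ keys[i]? = some x := by
  simp only [posKeys, List.mem_filterMap, PySem.List.mem_enumerate_iff]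
  constructor
  · rintro ⟨p, ⟨k, hk, rfl⟩, hp⟩
    by_cases h : keys[k] = x
    · simp [h] at hp
      have : k = i := by omega
      subst this
      simp [List.getElem?_eq_getElem hk, h]
    · simp [h] at hp
  · intro h
    have hi : i < keys.length := by
      by_contra hc
      simp [List.getElem?_eq_none (by omega : keys.length ≤ i)] at h
    have hx : keys[i] = x := by
      have := List.getElem?_eq_getElem hi ▸ h
      simpa using this
    exact ⟨((i : Int), keys[i]), ⟨i, hi, by simp⟩, by simp [hx]⟩

theorem nonneg_posKeys (x : String) (keys : List String) : ∀ j ∈ posKeys x keys, 0 ≤ j := by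
  intro j hj
  simp only [posKeys, List.mem_filterMap, PySem.List.mem_enumerate_iff] at hj
  obtain ⟨p, ⟨k, hk, rfl⟩, hp⟩ := hj
  by_cases h : keys[k] = x
  · simp [h] at hp
    omega
  · simp [h] at hp

theorem length_foldSet (l : List Int) (c : Int) : ∀ r : List Int,
    (l.foldl (fun r j => pySetIdx r j c) r).length = r.length := by
  induction l with
  | nil => intro r; rfl
  | cons j l ih =>
    intro r
    simp only [List.foldl_cons]
    rw [ih]
    simp [pySetIdx]

theorem getElem?_foldSet (l : List Int) (c : Int) (hl : ∀ j ∈ l, 0 ≤ j) (i : Nat) :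
    ∀ r : List Int,
    (l.foldl (fun r j => pySetIdx r j c) r)[i]?
    = if (i : Int) ∈ l ∧ i < r.length then some c else r[i]? := by
  induction l with
  | nil => intro r; simp
  | cons j l ih =>
    intro r
    have hj : 0 ≤ j := hl j (by simp)
    have hl' : ∀ j ∈ l, 0 ≤ j := fun j hj => hl j (by simp [hj])
    simp only [List.foldl_cons]
    rw [ih hl']
    have hlen : (pySetIdx r j c).length = r.length := by simp [pySetIdx]
    have hget : (pySetIdx r j c)[i]? = if j = (i : Int) ∧ i < r.length then some c else r[i]? := by
      simp only [pySetIdx, List.getElem?_set]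
      by_cases h : j = (i : Int)
      · have ht : j.toNat = i := by omega
        by_cases hi : i < r.length
        · simp [ht, h, hi]
        · simp [ht, h, hi, List.getElem?_eq_none (show r.length ≤ i by omega)]
      · have : j.toNat ≠ i := by omega
        simp [this, h]
    rw [hlen, hget]
    by_cases h2 : i < r.length
    · by_cases h3 : j = (i : Int)
      · simp [h2, h3, List.mem_cons]
      · have hif : ((i : Int) = j) = False := by
          simp only [eq_iff_iff, iff_false]
          exact fun hh => h3 hh.symm
        simp [h2, h3, List.mem_cons, hif]
    · simp [h2]

theorem getElem?_foldOuter (keys : List String) (c : Int) (i : Nat) :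
    ∀ (xs : List String) (r : List Int), r.length = keys.length →
    (xs.foldl (fun r x => (posKeys x keys).foldl (fun r j => pySetIdx r j c) r) r)[i]?
    = match keys[i]? with
      | some k => if xs.contains k then some c else r[i]?
      | none => r[i]? := by
  intro xs
  induction xs with
  | nil => intro r hr; cases keys[i]? <;> simp
  | cons x xs ih =>
    intro r hr
    simp only [List.foldl_cons]
    have hr1 : ((posKeys x keys).foldl (fun r j => pySetIdx r j c) r).length = keys.length := by
      rw [length_foldSet]; exact hr
    rw [ih _ hr1]
    rw [getElem?_foldSet _ _ (nonneg_posKeys x keys) i r]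
    simp only [mem_posKeys]
    cases hk : keys[i]? with
    | none =>
      have : ¬ i < keys.length := by
        intro hlt; simp [List.getElem?_eq_getElem hlt] at hk
      simp [hk, hr, this]
    | some k =>
      have hlt : i < keys.length := by
        by_contra hc
        simp [List.getElem?_eq_none (by omega : keys.length ≤ i)] at hk
      by_cases hx : k = x
      · subst hx
        simp [hk, hr, hlt, List.contains_cons]
      · have hne : ¬ (keys[i]? = some x) := by simp [hk, hx]
        have hbeq : (x == k) = false := by
          simp only [beq_eq_false_iff_ne, ne_eq]
          exact fun h => hx h.symm
        simp [hk, hx, List.contains_cons, hbeq, hr]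

theorem length_foldOuter (keys : List String) (c : Int) (xs : List String) :
    ∀ r : List Int,
    (xs.foldl (fun r x => (posKeys x keys).foldl (fun r j => pySetIdx r j c) r) r).length
    = r.length := by
  induction xs with
  | nil => intro r; rfl
  | cons x xs ih => intro r; simp only [List.foldl_cons]; rw [ih, length_foldSet]

theorem row_eq (dets deps keys : List String) :
    (dets.foldl (fun r x => (posKeys x keys).foldl (fun r j => pySetIdx r j 2) r)
       (deps.foldl (fun r x => (posKeys x keys).foldl (fun r j => pySetIdx r j 1) r)
         (List.replicate keys.length 0)))
    = keys.map (vOf dets deps) := by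
  have h1len : (deps.foldl (fun r x => (posKeys x keys).foldl (fun r j => pySetIdx r j 1) r)
      (List.replicate keys.length (0:Int))).length = keys.length := by
    rw [length_foldOuter]; simp
  apply List.ext_getElem?
  intro i
  rw [getElem?_foldOuter keys 2 i dets _ h1len]
  rw [getElem?_foldOuter keys 1 i deps _ (by simp)]
  cases hk : keys[i]? with
  | none =>
    have hge : ¬ i < keys.length := by
      intro hlt; simp [List.getElem?_eq_getElem hlt] at hk
    simp [hk, List.getElem?_replicate, hge]
  | some k =>
    have hlt : i < keys.length := by
      by_contra hc
      simp [List.getElem?_eq_none (by omega : keys.length ≤ i)] at hk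
    have hrep : (List.replicate keys.length (0:Int))[i]? = some 0 := by
      simp [List.getElem?_replicate, hlt]
    simp only [hk, hrep, List.getElem?_map, Option.map_some, vOf]
    split_ifs <;> rfl

-- ===== VERDICT (by name: the statement is the Claim_ definition above) =====
theorem construct_dependency_matrix_spec : Claim_equal_construct_dependency_matrix := by
  intro dependencies simple_keys _
  unfold Spec_construct_dependency_matrix
  unfold construct_dependency_matrix construct_dependency_matrix_alt
  simp only []
  apply List.map_congr_left
  intro d _
  have hA := rowA_eq d.1 d.2 simple_keys []
  simp only [List.nil_append, List.length_nil, Nat.cast_zero] at hA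
  rw [hA]
  simp only [index_getD]
  exact (row_eq d.1 d.2 simple_keys).symm
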